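-- pv_equiv track=rewrite | github.com/VadimToptunov/Demidovich | auto_localize_phase5_final.py | imp
-- ===== SOURCE A (Python) =====
-- def imp(c):
--     if 'stringResource(R.' not in c and 'getString(R.' not in c:
--         return c
--     h1 = 'import androidx.compose.ui.res.stringResource' in c
--     h2 = 'import com.vtoptunov.passwordgenerator.R' in c
--     if h1 and h2:
--         return c
--     ls = c.split('\n')
--     for i, l in enumerate(ls):
--         if l.startswith('package '):
--             x = i + 1
--             if not h2:
--                 ls.insert(x, 'import com.vtoptunov.passwordgenerator.R')
--                 x += 1
--             if not h1:
--                 ls.insert(x, 'import androidx.compose.ui.res.stringResource')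
--             return '\n'.join(ls)
--     return c
-- ===== SOURCE B (Python) =====
-- IMPORT_R = 'import com.vtoptunov.passwordgenerator.R'
-- IMPORT_SR = 'import androidx.compose.ui.res.stringResource'
--
--
-- def imp(c):
--     if 'stringResource(R.' not in c and 'getString(R.' not in c:
--         return c
--     block = ''.join('\n' + l for l in (IMPORT_R, IMPORT_SR) if l not in c)
--     if not block:
--         return c
--     # locate the first line starting with 'package ' by string offsets:
--     # offset 0, or one past the first occurrence of '\npackage '
--     if c.startswith('package '):
--         p = 0
--     else:
--         f = c.find('\npackage ')
--         if f < 0: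
--             return c
--         p = f + 1
--     # end of that line: next '\n' at or after p, else end of string
--     k = c.find('\n', p)
--     j = len(c) if k < 0 else k
--     return c[:j] + block + c[j:]
-- ===== Notes on version B (the rewrite author's own statement) =====
-- stated objective: alternative
-- what changed: B never builds a line list: it locates the package-declaration line directly in the string by offset (a prefix test at offset 0, else the first occurrence of a newline immediately followed by the package keyword), finds that line's end with a bounded find, and splices the missing-import block in by string slicing, while A splits into a list of lines, scans it with enumerate and does indexed list.insert plus join.
import Mathlib
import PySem

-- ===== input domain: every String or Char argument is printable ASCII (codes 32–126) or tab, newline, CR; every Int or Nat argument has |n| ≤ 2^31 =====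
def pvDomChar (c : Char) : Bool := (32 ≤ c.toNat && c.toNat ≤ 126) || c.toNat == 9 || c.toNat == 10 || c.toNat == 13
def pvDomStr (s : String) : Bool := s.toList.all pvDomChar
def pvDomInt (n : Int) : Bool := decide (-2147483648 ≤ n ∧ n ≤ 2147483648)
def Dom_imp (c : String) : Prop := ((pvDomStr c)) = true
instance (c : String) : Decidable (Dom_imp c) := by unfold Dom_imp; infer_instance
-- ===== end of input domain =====

-- B works on string offsets (find + slicing) instead of A's line list with indexed insert;
-- same O(n) cost, a genuinely different data representation.

-- ===== PORT A =====
-- A's 'for i, l in enumerate(ls)' loop: rem is the yet-unvisited suffix of ls, i its start index.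
def impLoopA (c : String) (ls : List String) (h1 h2 : Bool) : List String → Nat → String
  | [], _ => c
  | l :: rest, i =>
    if PySem.Str.startswith l "package " then
      let x : Int := (i : Int) + 1
      let p :=
        if !h2 then (PySem.List.insert ls x "import com.vtoptunov.passwordgenerator.R", x + 1)
        else (ls, x)
      let ls2 :=
        if !h1 then PySem.List.insert p.1 p.2 "import androidx.compose.ui.res.stringResource"
        else p.1
      PySem.Str.join "\n" ls2
    else impLoopA c ls h1 h2 rest (i + 1)

def imp (c : String) : String :=
  if !(PySem.Str.isIn "stringResource(R." c) && !(PySem.Str.isIn "getString(R." c) then c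
  else
    let h1 := PySem.Str.isIn "import androidx.compose.ui.res.stringResource" c
    let h2 := PySem.Str.isIn "import com.vtoptunov.passwordgenerator.R" c
    if h1 && h2 then c
    else
      let ls := (PySem.Str.split? c "\n").getD []   -- split on "\n" ≠ "" always succeeds
      impLoopA c ls h1 h2 ls 0

-- ===== PORT B =====
-- Source B's splice: c[:j] + block + c[j:] where j ends the package line (k = c.find('\n', p)).
def impSpliceB (c : String) (block : String) (p : Int) : String :=
  let k := PySem.Str.findFrom c "\n" p none
  let j : Int := if k < 0 then (PySem.Str.len c) else k
  PySem.Str.slice c none (some j) ++ block ++ PySem.Str.slice c (some j) none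

def imp_alt (c : String) : String :=
  if !(PySem.Str.isIn "stringResource(R." c) && !(PySem.Str.isIn "getString(R." c) then c
  else
    let block := PySem.Str.join ""
      ((["import com.vtoptunov.passwordgenerator.R",
         "import androidx.compose.ui.res.stringResource"].filter
           (fun l => !(PySem.Str.isIn l c))).map (fun l => "\n" ++ l))
    if block = "" then c
    else
      if PySem.Str.startswith c "package " then impSpliceB c block 0
      else
        let f := PySem.Str.find c "\npackage "
        if f < 0 then c
        else impSpliceB c block (f + 1)

-- ===== PRECONDITION & SPEC =====
def Spec_imp (c : String) (out : String) : Prop := out = imp_alt c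
instance (c : String) (out : String) : Decidable (Spec_imp c out) := by unfold Spec_imp; infer_instance

-- ===== CLAIM (what is proved, stated in full; the proofs are below) =====
def Claim_equal_imp : Prop := ∀ (c : String), Dom_imp c → Spec_imp c (imp c)

-- ===== LEMMAS AND PROOFS =====

-- the list of import lines A inserts, in A's insertion order, as a function of h2/h1
def impMissing (h1 h2 : Bool) : List String :=
  (if !h2 then ["import com.vtoptunov.passwordgenerator.R"] else []) ++
  (if !h1 then ["import androidx.compose.ui.res.stringResource"] else [])

-- A's result on the line list, as a first-match recursion returning the new line list
def aSpecS (missing : List String) : List String → Option (List String)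
  | [] => none
  | l :: tail =>
    if PySem.Str.startswith l "package " then some (l :: (missing ++ tail))
    else (aSpecS missing tail).map (l :: ·)

-- the same first-match recursion on lists of chars
def aSpecC (missing : List (List Char)) : List (List Char) → Option (List (List Char))
  | [] => none
  | l :: tail =>
    if PySem.Chars.startswith l "package ".toList then some (l :: (missing ++ tail))
    else (aSpecC missing tail).map (l :: ·)

-- structural single-char split on '\n' (= Python c.split('\n'))
def mySplit : List Char → List (List Char)
  | [] => [[]]
  | c :: t =>
    if c = '\n' then [] :: mySplit t
    else
      match mySplit t with
      | [] => [[c]]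
      | h :: r => (c :: h) :: r

-- B's main computation at char level, Option-valued (none = 'return c')
def bJ (s : List Char) (p : Int) : Int :=
  if PySem.Chars.findFrom s ['\n'] p none < 0 then (s.length : Int)
  else PySem.Chars.findFrom s ['\n'] p none

def bSpliceC (block s : List Char) (p : Int) : List Char :=
  PySem.Chars.slice s none (some (bJ s p)) ++ block ++ PySem.Chars.slice s (some (bJ s p)) none

def bOpt (block s : List Char) : Option (List Char) :=
  if PySem.Chars.startswith s "package ".toList then some (bSpliceC block s 0)
  else
    let f := PySem.Chars.find s ('\n' :: "package ".toList)
    if f < 0 then none else some (bSpliceC block s (f + 1))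

lemma insert_middle (pre tail : List String) (l v : String) :
    PySem.List.insert (pre ++ l :: tail) ((pre.length : Int) + 1) v = pre ++ l :: v :: tail := by
  have h : pre.length + 1 ≤ (pre ++ l :: tail).length := by simp
  rw [show ((pre.length : Int) + 1) = ((pre.length + 1 : Nat) : Int) by push_cast; ring,
    PySem.List.insert_natCast _ _ _ h,
    show pre ++ l :: tail = (pre ++ [l]) ++ tail by simp,
    List.take_left' (by simp), List.drop_left' (by simp)]
  simp

-- A's loop = join of the first-match recursion (with the processed prefix re-attached)
lemma impLoopA_eq_aSpecS (c : String) (h1 h2 : Bool) :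
    ∀ (rem pre : List String),
      impLoopA c (pre ++ rem) h1 h2 rem pre.length =
        (match aSpecS (impMissing h1 h2) rem with
         | none => c
         | some out => PySem.Str.join "\n" (pre ++ out)) := by
  intro rem
  induction rem with
  | nil => intro pre; rfl
  | cons l tail ih =>
    intro pre
    simp only [impLoopA, aSpecS]
    by_cases hs : PySem.Str.startswith l "package " = true
    · rw [if_pos hs, if_pos hs]
      simp only []
      cases h2 with
      | false =>
        cases h1 with
        | false =>
          simp only [Bool.not_false, reduceIte]
          rw [insert_middle,
            show pre ++ l :: "import com.vtoptunov.passwordgenerator.R" :: tail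
                = (pre ++ [l]) ++ "import com.vtoptunov.passwordgenerator.R" :: tail by simp,
            show ((pre.length : Int) + 1 + 1) = (((pre ++ [l]).length : Int) + 1) by
              push_cast [List.length_append, List.length_cons, List.length_nil]; ring,
            insert_middle]
          simp [impMissing]
        | true =>
          simp only [Bool.not_false, Bool.not_true, Bool.false_eq_true, if_false]
          rw [insert_middle]
          simp [impMissing]
      | true =>
        cases h1 with
        | false =>
          simp only [Bool.not_false, Bool.not_true, Bool.false_eq_true, if_false]
          rw [insert_middle]
          simp [impMissing]
        | true =>
          simp [impMissing]
    · rw [if_neg hs, if_neg hs]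
      have := ih (pre ++ [l])
      simp only [List.append_assoc, List.cons_append, List.nil_append, List.length_append,
        List.length_cons, List.length_nil] at this
      rw [show pre.length + 1 = pre.length + 1 from rfl]
      cases hA : aSpecS (impMissing h1 h2) tail with
      | none => simpa [hA] using this
      | some out => simpa [hA] using this

lemma impMissing_eq (c : String) :
    (["import com.vtoptunov.passwordgenerator.R",
      "import androidx.compose.ui.res.stringResource"].filter
        (fun line => !(PySem.Str.isIn line c))) =
      impMissing (PySem.Str.isIn "import androidx.compose.ui.res.stringResource" c)
        (PySem.Str.isIn "import com.vtoptunov.passwordgenerator.R" c) := by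
  unfold impMissing
  cases hA : PySem.Str.isIn "import androidx.compose.ui.res.stringResource" c <;>
    cases hB : PySem.Str.isIn "import com.vtoptunov.passwordgenerator.R" c <;>
    simp only [List.filter_cons, List.filter_nil, hA, hB, Bool.not_true, Bool.not_false]
  all_goals rfl

-- aSpecS / aSpecC bridge
lemma aSpecS_eq_aSpecC (missing : List String) :
    ∀ ls : List String,
      (aSpecS missing ls).map (List.map String.toList) =
        aSpecC (missing.map String.toList) (ls.map String.toList) := by
  intro ls
  induction ls with
  | nil => rfl
  | cons l tail ih =>
    simp only [aSpecS, aSpecC, List.map_cons, PySem.Str.startswith_eq]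
    by_cases hs : PySem.Chars.startswith l.toList "package ".toList = true
    all_goals simp only [show ("package ".toList) = ['p','a','c','k','a','g','e',' '] from rfl] at hs ⊢
    · simp [hs]
    · simp only [hs, ← ih]
      cases aSpecS missing tail <;> simp

-- ---------- splitOn = mySplit ----------

lemma mySplit_ne_nil (s : List Char) : mySplit s ≠ [] := by
  cases s with
  | nil => simp [mySplit]
  | cons c t =>
    simp only [mySplit]
    split
    · simp
    · cases h : mySplit t <;> simp

lemma splitOn_go_eq (fuel : Nat) :
    ∀ (l cur : List Char) (acc : List (List Char)), l.length < fuel →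
      PySem.Chars.splitOn.go ['\n'] fuel l cur acc =
        acc.reverse ++
          (match mySplit l with
           | [] => [cur.reverse]
           | h :: r => (cur.reverse ++ h) :: r) := by
  induction fuel with
  | zero => intro l cur acc h; omega
  | succ fuel ih =>
    intro l cur acc h
    cases l with
    | nil =>
      simp [PySem.Chars.splitOn.go, mySplit]
    | cons c t =>
      rw [PySem.Chars.splitOn.go]
      by_cases hc : c = '\n'
      · subst hc
        have hpre : List.isPrefixOf ['\n'] ('\n' :: t) = true := by
          simp [List.isPrefixOf]
        rw [if_pos hpre]
        simp only [List.length_cons, List.length_nil, List.drop_succ_cons, List.drop_zero]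
        rw [ih t [] (cur.reverse :: acc) (by simpa using Nat.lt_of_succ_lt_succ h)]
        simp only [mySplit, if_pos rfl]
        cases hm : mySplit t with
        | nil => exact absurd hm (mySplit_ne_nil t)
        | cons h' r => simp
      · have hpre : List.isPrefixOf ['\n'] (c :: t) = false := by
          simp only [List.isPrefixOf, List.isPrefixOf_nil_left, Bool.and_true, beq_iff_eq,
            decide_eq_false_iff_not]
          exact beq_eq_false_iff_ne.mpr fun h => hc (Eq.symm h)
        rw [if_neg (by simp [hpre])]
        have := ih t (c :: cur) acc (by simpa using Nat.lt_of_succ_lt_succ h)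
        rw [this]
        simp only [mySplit, if_neg hc]
        cases hm : mySplit t with
        | nil => exact absurd hm (mySplit_ne_nil t)
        | cons h' r => simp

lemma splitOn_eq_mySplit (s : List Char) :
    PySem.Chars.splitOn s ['\n'] = mySplit s := by
  unfold PySem.Chars.splitOn
  rw [splitOn_go_eq (s.length + 1) s [] [] (by omega)]
  cases hm : mySplit s with
  | nil => exact absurd hm (mySplit_ne_nil s)
  | cons h r => simp

lemma mySplit_no_nl (s : List Char) (h : '\n' ∉ s) : mySplit s = [s] := by
  induction s with
  | nil => rfl
  | cons c t ih =>
    simp only [List.mem_cons, not_or] at h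
    have hc : ¬ c = '\n' := fun e => h.1 e.symm
    simp only [mySplit, if_neg hc, ih h.2]

lemma mySplit_append (a t : List Char) (h : '\n' ∉ a) :
    mySplit (a ++ '\n' :: t) = a :: mySplit t := by
  induction a with
  | nil => simp [mySplit]
  | cons c a' ih =>
    simp only [List.mem_cons, not_or] at h
    have hc : ¬ c = '\n' := fun e => h.1 e.symm
    simp only [List.cons_append, mySplit, if_neg hc, ih h.2]

lemma join_mySplit (s : List Char) : PySem.Chars.join ['\n'] (mySplit s) = s := by
  induction s with
  | nil => rfl
  | cons c t ih =>
    simp only [mySplit]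
    by_cases hc : c = '\n'
    · subst hc
      rw [if_pos rfl]
      cases hm : mySplit t with
      | nil => exact absurd hm (mySplit_ne_nil t)
      | cons h r =>
        rw [hm] at ih
        rw [PySem.Chars.join_cons_cons]
        simp [ih]
    · rw [if_neg hc]
      cases hm : mySplit t with
      | nil => exact absurd hm (mySplit_ne_nil t)
      | cons h r =>
        rw [hm] at ih
        cases r with
        | nil =>
          simp only [PySem.Chars.join_singleton] at ih ⊢
          simp [ih]
        | cons q r' =>
          rw [PySem.Chars.join_cons_cons] at ih ⊢
          simp [← ih]

-- ---------- join lemmas ----------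

def blockOf (missing : List (List Char)) : List Char :=
  (missing.map (fun l => '\n' :: l)).flatten

lemma join_cons_block (x : List Char) (ms : List (List Char)) :
    PySem.Chars.join ['\n'] (x :: ms) = x ++ blockOf ms := by
  induction ms generalizing x with
  | nil => simp [PySem.Chars.join_singleton, blockOf]
  | cons m ms' ih =>
    rw [PySem.Chars.join_cons_cons, ih m]
    simp [blockOf]

lemma join_split (x : List Char) (ms : List (List Char)) (ls : List (List Char)) (h : ls ≠ []) :
    PySem.Chars.join ['\n'] (x :: (ms ++ ls)) =
      x ++ blockOf ms ++ '\n' :: PySem.Chars.join ['\n'] ls := by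
  induction ms generalizing x with
  | nil =>
    cases ls with
    | nil => exact absurd rfl h
    | cons q r =>
      rw [List.nil_append, PySem.Chars.join_cons_cons]
      simp [blockOf]
  | cons m ms' ih =>
    rw [List.cons_append, PySem.Chars.join_cons_cons, ih m]
    simp [blockOf]

-- ---------- find characterizations ----------

lemma find_unique (s sub : List Char) (k : Nat) (hk : k ≤ s.length)
    (hpre : sub <+: s.drop k) (hmin : ∀ i < k, ¬ sub <+: s.drop i) :
    PySem.Chars.find s sub = (k : Int) := by
  have hinf : sub <:+: s := by
    rcases hpre with ⟨u, hu⟩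
    exact ⟨s.take k, u, by rw [List.append_assoc, hu, List.take_append_drop]⟩
  have h0 : 0 ≤ PySem.Chars.find s sub := (PySem.Chars.find_nonneg_iff s sub).mpr hinf
  obtain ⟨hp, hm⟩ := PySem.Chars.find_spec h0
  rcases lt_trichotomy (PySem.Chars.find s sub).toNat k with h | h | h
  · exact absurd hp (hmin _ h)
  · omega
  · exact absurd hpre (hm k h)

lemma no_nl_drop_prefix (a : List Char) (t : List Char) (ha : '\n' ∉ a) (sub : List Char)
    (hsub : sub.head? = some '\n') :
    ∀ i < a.length, ¬ sub <+: (a ++ t).drop i := by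
  intro i hi hp
  cases hs : sub with
  | nil => simp [hs] at hsub
  | cons c u =>
    rw [hs] at hsub hp
    rw [List.head?_cons] at hsub
    simp only [Option.some.injEq] at hsub
    subst hsub
    have hdrop : (a ++ t).drop i = a[i] :: (a.drop (i+1) ++ t) := by
      rw [List.drop_append_of_le_length (by omega), List.drop_eq_getElem_cons (by omega)]
      rfl
    rw [hdrop] at hp
    rcases hp with ⟨v, hv⟩
    simp only [List.cons_append, List.cons.injEq] at hv
    exact ha (hv.1 ▸ List.getElem_mem _)

lemma find_nl (a t : List Char) (ha : '\n' ∉ a) :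
    PySem.Chars.find (a ++ '\n' :: t) ['\n'] = (a.length : Int) := by
  apply find_unique _ _ _ (by simp)
  · rw [List.drop_left]
    exact ⟨t, rfl⟩
  · exact no_nl_drop_prefix a ('\n' :: t) ha ['\n'] rfl

lemma find_no_nl (s sub : List Char) (hs : '\n' ∉ s) (hsub : '\n' ∈ sub) :
    PySem.Chars.find s sub = -1 := by
  rw [PySem.Chars.find_eq_neg_one_iff]
  intro hinf
  exact hs (hinf.subset hsub)

lemma drop_shift (a t : List Char) (m : Nat) :
    (a ++ '\n' :: t).drop (a.length + 1 + m) = t.drop m := by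
  rw [List.drop_append, List.drop_of_length_le (by omega),
    show a.length + 1 + m - a.length = m + 1 by omega]
  simp

-- first occurrence of '\npackage ' in a ++ '\n'::t, '\n' ∉ a
lemma find_nlpkg (a t : List Char) (ha : '\n' ∉ a) :
    PySem.Chars.find (a ++ '\n' :: t) ('\n' :: "package ".toList) =
      if PySem.Chars.startswith t "package ".toList then (a.length : Int)
      else if PySem.Chars.find t ('\n' :: "package ".toList) = -1 then -1
      else (a.length : Int) + 1 + PySem.Chars.find t ('\n' :: "package ".toList) := by
  by_cases hpt : PySem.Chars.startswith t "package ".toList = true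
  · rw [if_pos hpt]
    apply find_unique _ _ _ (by simp)
    · rw [List.drop_left]
      exact (List.cons_prefix_cons).mpr ⟨rfl, (PySem.Chars.startswith_iff _ _).mp hpt⟩
    · exact no_nl_drop_prefix a ('\n' :: t) ha _ rfl
  · rw [if_neg hpt]
    have hnp : ¬ ('\n' :: "package ".toList) <+: ('\n' :: t) := by
      intro hp
      exact hpt ((PySem.Chars.startswith_iff _ _).mpr ((List.cons_prefix_cons).mp hp).2)
    by_cases hft : PySem.Chars.find t ('\n' :: "package ".toList) = -1
    · rw [if_pos hft]
      rw [PySem.Chars.find_eq_neg_one_iff] at hft ⊢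
      intro hinf
      obtain ⟨j, hj⟩ := (PySem.Chars.exists_prefix_drop_iff_isIn _ _).mpr
        ((PySem.Chars.isIn_iff_infix _ _).mpr hinf)
      rcases lt_trichotomy j a.length with h | h | h
      · exact no_nl_drop_prefix a ('\n' :: t) ha _ rfl j h hj
      · subst h
        rw [List.drop_left] at hj
        exact hnp hj
      · have : (a ++ '\n' :: t).drop j = t.drop (j - a.length - 1) := by
          have := drop_shift a t (j - a.length - 1)
          rw [show a.length + 1 + (j - a.length - 1) = j by omega] at this
          exact this
        rw [this] at hj
        exact hft ((PySem.Chars.isIn_iff_infix _ _).mp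
          ((PySem.Chars.exists_prefix_drop_iff_isIn _ _).mp ⟨_, hj⟩))
    · rw [if_neg hft]
      have h0 : 0 ≤ PySem.Chars.find t ('\n' :: "package ".toList) := by
        have := PySem.Chars.neg_one_le_find t ('\n' :: "package ".toList)
        omega
      obtain ⟨hp, hm⟩ := PySem.Chars.find_spec h0
      set ft := (PySem.Chars.find t ('\n' :: "package ".toList)).toNat with hftn
      have hcast : PySem.Chars.find t ('\n' :: "package ".toList) = (ft : Int) := by omega
      have hle : ft ≤ t.length := by
        have := PySem.Chars.find_le_length t ('\n' :: "package ".toList)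
        omega
      rw [hcast]
      rw [show ((a.length : Int) + 1 + (ft : Int)) = ((a.length + 1 + ft : Nat) : Int) by push_cast; ring]
      apply find_unique _ _ _ (by simp; omega)
      · rw [drop_shift]; exact hp
      · intro i hi
        rcases lt_trichotomy i a.length with h | h | h
        · exact no_nl_drop_prefix a ('\n' :: t) ha _ rfl i h
        · subst h
          rw [List.drop_left]
          exact hnp
        · intro hpre
          have hi' : i - a.length - 1 < ft := by omega
          have : (a ++ '\n' :: t).drop i = t.drop (i - a.length - 1) := by
            have := drop_shift a t (i - a.length - 1)
            rw [show a.length + 1 + (i - a.length - 1) = i by omega] at this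
            exact this
          rw [this] at hpre
          exact hm _ hi' hpre

-- ---------- prefix across the first newline ----------

lemma pkg_prefix_line (a t : List Char) (ha : '\n' ∉ a)
    (h : PySem.Chars.startswith (a ++ '\n' :: t) "package ".toList = true) :
    PySem.Chars.startswith a "package ".toList = true := by
  rw [PySem.Chars.startswith_iff] at h ⊢
  have hnl : '\n' ∉ "package ".toList := by decide
  have hlen : "package ".toList.length ≤ a.length := by
    by_contra hlt
    push_neg at hlt
    rcases h with ⟨u, hu⟩
    have h1 : ("package ".toList ++ u)[a.length]? = some '\n' := by
      rw [hu, List.getElem?_append_right (le_refl _)]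
      simp
    rw [List.getElem?_append_left (by omega)] at h1
    exact hnl (List.mem_of_getElem? h1)
  exact List.prefix_of_prefix_length_le h (a.prefix_append _) hlen

lemma split_first_nl : ∀ s : List Char, '\n' ∈ s → ∃ a t, '\n' ∉ a ∧ s = a ++ '\n' :: t := by
  intro s hs
  induction s with
  | nil => simp at hs
  | cons c t ih =>
    by_cases hc : c = '\n'
    · exact ⟨[], t, by simp, by rw [hc]; rfl⟩
    · have ht : '\n' ∈ t := by
        rcases List.mem_cons.mp hs with h | h
        · exact absurd h.symm hc
        · exact h
      obtain ⟨a, t', ha, he⟩ := ih ht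
      exact ⟨c :: a, t', by
        simp only [List.mem_cons, not_or]
        exact ⟨fun e => hc e.symm, ha⟩, by rw [he]; rfl⟩

lemma aSpecC_some_ne_nil (missing : List (List Char)) :
    ∀ ls out, aSpecC missing ls = some out → out ≠ [] := by
  intro ls
  induction ls with
  | nil => intro out h; simp [aSpecC] at h
  | cons l tail ih =>
    intro out h
    simp only [aSpecC] at h
    split at h
    · cases h; simp
    · cases hA : aSpecC missing tail with
      | none => rw [hA] at h; simp at h
      | some o =>
        rw [hA] at h
        simp only [Option.map_some, Option.some.injEq] at h
        rw [← h]
        simp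

lemma take_shift (a t : List Char) (m : Nat) :
    (a ++ '\n' :: t).take (a.length + 1 + m) = a ++ '\n' :: t.take m := by
  rw [List.take_append, List.take_of_length_le (by omega),
    show a.length + 1 + m - a.length = m + 1 by omega]
  rfl

lemma bSpliceC_shift (block a t : List Char) (m : Nat) (hm : m ≤ t.length) :
    bSpliceC block (a ++ '\n' :: t) ((a.length + 1 + m : Nat) : Int) =
      a ++ '\n' :: bSpliceC block t ((m : Nat) : Int) := by
  unfold bSpliceC bJ
  have hlen : (a ++ '\n' :: t).length = a.length + 1 + t.length := by simp; omega
  rw [PySem.Chars.findFrom_natCast _ _ (a.length + 1 + m) (by omega),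
    PySem.Chars.findFrom_natCast _ _ m (by omega),
    drop_shift]
  by_cases hf : PySem.Chars.find (t.drop m) ['\n'] = -1
  · rw [if_pos hf, if_pos hf]
    rw [if_pos (by omega : (-1 : Int) < 0), if_pos (by omega : (-1 : Int) < 0)]
    simp only [PySem.Chars.slice_eq_listSlice]
    rw [PySem.List.slice_to_natCast, PySem.List.slice_from_natCast,
      PySem.List.slice_to_natCast, PySem.List.slice_from_natCast]
    simp [List.take_of_length_le, List.drop_of_length_le]
  · have h0 : 0 ≤ PySem.Chars.find (t.drop m) ['\n'] := by
      have := PySem.Chars.neg_one_le_find (t.drop m) ['\n']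
      omega
    have hql : (PySem.Chars.find (t.drop m) ['\n']).toNat ≤ (t.drop m).length := by
      have := PySem.Chars.find_le_length (t.drop m) ['\n']
      omega
    set q := (PySem.Chars.find (t.drop m) ['\n']).toNat with hq
    have hcast : PySem.Chars.find (t.drop m) ['\n'] = (q : Int) := by omega
    rw [hcast]
    rw [if_neg (by omega : ¬ ((q : Int) = -1)), if_neg (by omega : ¬ ((q : Int) = -1))]
    rw [if_neg (by omega), if_neg (by omega)]
    rw [show ((a.length + 1 + m : Nat) : Int) + (q : Int) = ((a.length + 1 + (m + q) : Nat) : Int) by push_cast; ring,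
      show ((m : Nat) : Int) + (q : Int) = ((m + q : Nat) : Int) by push_cast; ring]
    simp only [PySem.Chars.slice_eq_listSlice]
    rw [PySem.List.slice_to_natCast, PySem.List.slice_from_natCast,
      PySem.List.slice_to_natCast, PySem.List.slice_from_natCast,
      take_shift, drop_shift]
    simp

-- ---------- MAIN: aSpecC over mySplit = bOpt ----------

lemma bSpliceC_top (block s : List Char) (hnl : '\n' ∉ s) :
    bSpliceC block s ((0 : Nat) : Int) = s ++ block := by
  unfold bSpliceC bJ
  rw [PySem.Chars.findFrom_natCast _ _ 0 (by omega)]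
  simp only [List.drop_zero, find_no_nl s ['\n'] hnl (by simp), if_pos rfl]
  rw [if_pos (by omega)]
  simp only [PySem.Chars.slice_eq_listSlice]
  rw [PySem.List.slice_to_natCast, PySem.List.slice_from_natCast]
  simp

lemma bSpliceC_line (block a t : List Char) (ha : '\n' ∉ a) :
    bSpliceC block (a ++ '\n' :: t) ((0 : Nat) : Int) = a ++ block ++ '\n' :: t := by
  unfold bSpliceC bJ
  rw [PySem.Chars.findFrom_natCast _ _ 0 (by omega)]
  simp only [List.drop_zero, find_nl a t ha]
  rw [if_neg (by omega : ¬ ((a.length : Int) = -1))]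
  rw [if_neg (by omega)]
  rw [show (((0 : Nat) : Int)) + ((a.length : Nat) : Int) = ((a.length : Nat) : Int) by push_cast; ring]
  simp only [PySem.Chars.slice_eq_listSlice]
  rw [PySem.List.slice_to_natCast, PySem.List.slice_from_natCast,
    List.take_left, List.drop_left]

lemma main_eq (missing : List (List Char)) :
    ∀ (n : Nat) (s : List Char), s.length ≤ n →
      (aSpecC missing (mySplit s)).map (PySem.Chars.join ['\n']) =
        bOpt (blockOf missing) s := by
  intro n
  induction n with
  | zero =>
    intro s hs
    have : s = [] := List.length_eq_zero_iff.mp (by omega)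
    subst this
    simp only [mySplit, aSpecC, bOpt]
    rw [if_neg (by decide), if_neg (by decide)]
    rw [if_pos (by decide : (PySem.Chars.find [] ('\n' :: "package ".toList)) < 0)]
    rfl
  | succ n ih =>
    intro s hs
    by_cases hnl : '\n' ∈ s
    · obtain ⟨a, t, ha, rfl⟩ := split_first_nl s hnl
      have hts : t.length ≤ n := by
        have h := hs
        simp only [List.length_append, List.length_cons] at h
        omega
      have iht := ih t hts
      rw [mySplit_append a t ha]
      by_cases hp : PySem.Chars.startswith a "package ".toList = true
      · -- the first line is the package line
        have hps : PySem.Chars.startswith (a ++ '\n' :: t) "package ".toList = true := by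
          rw [PySem.Chars.startswith_iff] at hp ⊢
          exact hp.trans (a.prefix_append _)
        simp only [aSpecC, if_pos hp, bOpt, if_pos hps, Option.map_some]
        rw [join_split a missing (mySplit t) (mySplit_ne_nil t), join_mySplit]
        rw [show (0 : Int) = ((0 : Nat) : Int) from rfl, bSpliceC_line _ _ _ ha]
      · -- the first line is not the package line
        have hps : ¬ PySem.Chars.startswith (a ++ '\n' :: t) "package ".toList = true :=
          fun h => hp (pkg_prefix_line a t ha h)
        simp only [aSpecC, if_neg hp, bOpt, if_neg hps, Option.map_map]
        rw [find_nlpkg a t ha]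
        simp only [bOpt] at iht
        by_cases hpt : PySem.Chars.startswith t "package ".toList = true
        · rw [if_pos hpt]
          rw [if_pos hpt] at iht
          rw [if_neg (by omega : ¬ ((a.length : Int) < 0))]
          cases hA : aSpecC missing (mySplit t) with
          | none => rw [hA] at iht; simp at iht
          | some out =>
            rw [hA] at iht
            simp only [Option.map_some, Option.some.injEq] at iht
            simp only [Option.map_some, Option.some.injEq, Function.comp_apply]
            have hne := aSpecC_some_ne_nil missing (mySplit t) out hA
            cases out with
            | nil => exact absurd rfl hne
            | cons q r =>
              rw [PySem.Chars.join_cons_cons]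
              rw [show ((a.length : Int) + 1) = ((a.length + 1 + 0 : Nat) : Int) by push_cast; ring,
                bSpliceC_shift _ _ _ 0 (by omega)]
              rw [show ((0 : Nat) : Int) = (0 : Int) from rfl, ← iht]
              simp
        · rw [if_neg hpt]
          rw [if_neg hpt] at iht
          by_cases hft : PySem.Chars.find t ('\n' :: "package ".toList) = -1
          · rw [if_pos hft, if_pos (by omega : (-1 : Int) < 0)]
            rw [if_pos (by omega : PySem.Chars.find t ('\n' :: "package ".toList) < 0)] at iht
            cases hA : aSpecC missing (mySplit t) with
            | none => rfl
            | some out => rw [hA] at iht; simp at iht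
          · have h0 : 0 ≤ PySem.Chars.find t ('\n' :: "package ".toList) := by
              have := PySem.Chars.neg_one_le_find t ('\n' :: "package ".toList)
              omega
            rw [if_neg hft]
            rw [if_neg (by omega : ¬ (PySem.Chars.find t ('\n' :: "package ".toList) < 0))] at iht
            rw [if_neg (by omega : ¬ ((a.length : Int) + 1 + PySem.Chars.find t ('\n' :: "package ".toList) < 0))]
            cases hA : aSpecC missing (mySplit t) with
            | none => rw [hA] at iht; simp at iht
            | some out =>
              rw [hA] at iht
              simp only [Option.map_some, Option.some.injEq] at iht
              simp only [Option.map_some, Option.some.injEq, Function.comp_apply]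
              have hne := aSpecC_some_ne_nil missing (mySplit t) out hA
              -- bound: the occurrence fits inside t
              have hb : (PySem.Chars.find t ('\n' :: "package ".toList)).toNat + 1 ≤ t.length := by
                obtain ⟨hpre, -⟩ := PySem.Chars.find_spec h0
                have hlen := hpre.length_le
                rw [List.length_drop] at hlen
                simp only [List.length_cons] at hlen
                omega
              cases out with
              | nil => exact absurd rfl hne
              | cons q r =>
                rw [PySem.Chars.join_cons_cons]
                have hcast : (a.length : Int) + 1 + PySem.Chars.find t ('\n' :: "package ".toList) + 1 =
                    ((a.length + 1 + ((PySem.Chars.find t ('\n' :: "package ".toList)).toNat + 1) : Nat) : Int) := by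
                  omega
                rw [hcast, bSpliceC_shift _ _ _ _ hb]
                rw [show (((PySem.Chars.find t ('\n' :: "package ".toList)).toNat + 1 : Nat) : Int) =
                    PySem.Chars.find t ('\n' :: "package ".toList) + 1 by omega, ← iht]
                simp
    · -- no newline: a single line
      rw [mySplit_no_nl s hnl]
      by_cases hp : PySem.Chars.startswith s "package ".toList = true
      · simp only [aSpecC, if_pos hp, bOpt, if_pos hp, Option.map_some, List.append_nil]
        rw [join_cons_block, show (0 : Int) = ((0 : Nat) : Int) from rfl, bSpliceC_top _ _ hnl]
      · simp only [aSpecC, if_neg hp, bOpt, if_neg hp, Option.map_none]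
        rw [if_pos (by
          rw [find_no_nl s ('\n' :: "package ".toList) hnl (by simp)]
          omega)]

lemma impSpliceB_toList (c block : String) (p : Int) :
    (impSpliceB c block p).toList = bSpliceC block.toList c.toList p := by
  simp only [impSpliceB, bSpliceC, bJ, PySem.Str.findFrom_eq, PySem.Str.len_eq,
    String.toList_append, PySem.Str.toList_slice]
  rfl

lemma split_line_list (c : String) :
    ((PySem.Str.split? c "\n").getD []).map String.toList = mySplit c.toList := by
  have h := PySem.Str.split?_map c "\n"
  rw [show ("\n".toList) = ['\n'] from rfl, PySem.Chars.split?, if_neg (by simp),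
    splitOn_eq_mySplit] at h
  cases hs : PySem.Str.split? c "\n" with
  | none => rw [hs] at h; simp at h
  | some l =>
    rw [hs] at h
    simp only [Option.map_some, Option.some.injEq] at h
    simpa using h

lemma bridge (c : String) (missing : List String) (block : String)
    (hb : block.toList = blockOf (List.map String.toList missing)) :
    (match aSpecS missing ((PySem.Str.split? c "\n").getD []) with
     | none => c
     | some out => PySem.Str.join "\n" out) =
    (if PySem.Str.startswith c "package " then impSpliceB c block 0
     else
       if PySem.Str.find c "\npackage " < 0 then c
       else impSpliceB c block (PySem.Str.find c "\npackage " + 1)) := by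
  have hls := split_line_list c
  have hAS := aSpecS_eq_aSpecC missing ((PySem.Str.split? c "\n").getD [])
  rw [hls] at hAS
  have hmain := main_eq (missing.map String.toList) (c.toList.length) c.toList le_rfl
  rw [← hAS] at hmain
  unfold bOpt at hmain
  by_cases hsw : PySem.Chars.startswith c.toList "package ".toList = true
  · rw [if_pos hsw] at hmain
    have hswS : PySem.Str.startswith c "package " = true := by
      rw [PySem.Str.startswith_eq]; exact hsw
    rw [if_pos hswS]
    cases hA : aSpecS missing ((PySem.Str.split? c "\n").getD []) with
    | none => rw [hA] at hmain; simp at hmain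
    | some out =>
      rw [hA] at hmain
      simp only [Option.map_some, Option.some.injEq] at hmain
      apply String.toList_inj.mp
      rw [impSpliceB_toList, hb, PySem.Str.toList_join,
        show ("\n".toList) = ['\n'] from rfl]
      exact hmain
  · rw [if_neg hsw] at hmain
    have hswS : ¬ PySem.Str.startswith c "package " = true := by
      rw [PySem.Str.startswith_eq]; exact hsw
    rw [if_neg hswS]
    have hfind : PySem.Str.find c "\npackage " = PySem.Chars.find c.toList ('\n' :: "package ".toList) := by
      rw [PySem.Str.find_eq]; rfl
    by_cases hf : PySem.Chars.find c.toList ('\n' :: "package ".toList) < 0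
    · rw [if_pos hf] at hmain
      rw [if_pos (by rw [hfind]; exact hf)]
      cases hA : aSpecS missing ((PySem.Str.split? c "\n").getD []) with
      | none => rfl
      | some out => rw [hA] at hmain; simp at hmain
    · rw [if_neg hf] at hmain
      rw [if_neg (by rw [hfind]; exact hf)]
      cases hA : aSpecS missing ((PySem.Str.split? c "\n").getD []) with
      | none => rw [hA] at hmain; simp at hmain
      | some out =>
        rw [hA] at hmain
        simp only [Option.map_some, Option.some.injEq] at hmain
        apply String.toList_inj.mp
        rw [impSpliceB_toList, hb, hfind, PySem.Str.toList_join,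
          show ("\n".toList) = ['\n'] from rfl]
        exact hmain

-- ===== VERDICT (by name: the statement is the Claim_ definition above) =====
theorem imp_spec : Claim_equal_imp := by
  intro c _
  unfold Spec_imp
  simp only [imp, imp_alt]
  by_cases hg : (!(PySem.Str.isIn "stringResource(R." c)
      && !(PySem.Str.isIn "getString(R." c)) = true
  · rw [if_pos hg, if_pos hg]
  · rw [if_neg hg, if_neg hg, impMissing_eq c]
    have hloop := impLoopA_eq_aSpecS c
      (PySem.Str.isIn "import androidx.compose.ui.res.stringResource" c)
      (PySem.Str.isIn "import com.vtoptunov.passwordgenerator.R" c)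
      ((PySem.Str.split? c "\n").getD []) []
    simp only [List.nil_append, List.length_nil] at hloop
    cases h1 : PySem.Str.isIn "import androidx.compose.ui.res.stringResource" c <;>
      cases h2 : PySem.Str.isIn "import com.vtoptunov.passwordgenerator.R" c <;>
      rw [h1, h2] at hloop <;>
      simp only [Bool.and_self, Bool.and_false, Bool.false_and, Bool.and_true, Bool.true_and,
        Bool.false_eq_true, if_false, if_true]
    · rw [hloop, bridge c (impMissing false false)
          (PySem.Str.join "" ((impMissing false false).map (fun l => "\n" ++ l))) (by decide),
        if_neg (by decide : ¬ (PySem.Str.join ""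
          ((impMissing false false).map (fun l => "\n" ++ l)) = ""))]
    · rw [hloop, bridge c (impMissing false true)
          (PySem.Str.join "" ((impMissing false true).map (fun l => "\n" ++ l))) (by decide),
        if_neg (by decide : ¬ (PySem.Str.join ""
          ((impMissing false true).map (fun l => "\n" ++ l)) = ""))]
    · rw [hloop, bridge c (impMissing true false)
          (PySem.Str.join "" ((impMissing true false).map (fun l => "\n" ++ l))) (by decide),
        if_neg (by decide : ¬ (PySem.Str.join ""
          ((impMissing true false).map (fun l => "\n" ++ l)) = ""))]
    · rw [if_pos (by decide : (PySem.Str.join ""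
          ((impMissing true true).map (fun l => "\n" ++ l)) = ""))]
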